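-- pv_equiv track=rewrite | github.com/MrBrantCode/unitest_baseline | mut_generate/mist_train_cf/cf_68955/solution.py | optimal_duo_arrangement_cost
-- ===== SOURCE A (Python) =====
-- def optimal_duo_arrangement_cost(p):
--     # generate optimal duo arrangement
--     duo_arrangement = [(a, p-a) for a in range(1, (p+1)//2)]
--     # calculate cost multiplication
--     cost_multiplication = 1
--     for a, b in duo_arrangement:
--         cost = a * b % p
--         cost_multiplication *= cost
--         cost_multiplication %= p  # to prevent overflow
--     return cost_multiplication
-- ===== SOURCE B (Python) =====
-- def optimal_duo_arrangement_cost(p):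
--     # a*(p-a) == -a*a (mod p), so the product of the pair costs is
--     # (-1)^m * (m!)^2 mod p, where m = (p+1)//2 - 1 pairs.
--     m = (p + 1) // 2 - 1
--     if m <= 0:
--         return 1
--     fact = 1
--     for a in range(1, m + 1):
--         fact = fact * a % p
--     return ((-1) ** m * fact * fact) % p
-- ===== Notes on version B (the rewrite author's own statement) =====
-- stated objective: faster
-- what changed: Replaces the pairwise product of a*(p-a) (built as an explicit pair list) by the closed-form identity a*(p-a) ≡ -a² (mod p): B accumulates a single factorial m! mod p and returns ((-1)^m · (m!)²) mod p, with an empty product when there are no pairs.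
import Mathlib
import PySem

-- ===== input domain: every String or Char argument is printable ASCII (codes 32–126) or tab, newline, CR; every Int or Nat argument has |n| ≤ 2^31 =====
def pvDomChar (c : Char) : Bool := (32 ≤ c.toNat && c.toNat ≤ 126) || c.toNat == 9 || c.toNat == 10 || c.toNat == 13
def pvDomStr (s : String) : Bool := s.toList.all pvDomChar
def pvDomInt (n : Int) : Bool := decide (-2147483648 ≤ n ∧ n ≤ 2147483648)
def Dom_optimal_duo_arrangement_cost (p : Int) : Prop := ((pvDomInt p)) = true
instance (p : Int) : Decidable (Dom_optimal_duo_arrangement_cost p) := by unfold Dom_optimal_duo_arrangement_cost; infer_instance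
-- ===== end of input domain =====

-- B replaces A's pairwise product of a*(p-a) by the identity a*(p-a) ≡ -a² (mod p):
-- it accumulates a single factorial m! mod p and returns ((-1)^m·(m!)²) mod p (constant-factor faster, same O(p)).

-- ===== PORT A =====
def optimal_duo_arrangement_cost (p : Int) : Int :=
  let duo_arrangement : List (Int × Int) :=
    (PySem.List.pyRange 1 (PySem.Int.floordiv (p + 1) 2) 1).map (fun a => (a, p - a))
  duo_arrangement.foldl
    (fun acc ab => PySem.Int.mod (acc * PySem.Int.mod (ab.1 * ab.2) p) p) 1

-- ===== PORT B =====
def optimal_duo_arrangement_cost_alt (p : Int) : Int :=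
  let m := PySem.Int.floordiv (p + 1) 2 - 1
  if m ≤ 0 then 1
  else
    let fact := (PySem.List.pyRange 1 (m + 1) 1).foldl
      (fun f a => PySem.Int.mod (f * a) p) 1
    PySem.Int.mod ((-1) ^ m.toNat * fact * fact) p

-- ===== PRECONDITION & SPEC =====
def Spec_optimal_duo_arrangement_cost (p : Int) (out : Int) : Prop := out = optimal_duo_arrangement_cost_alt p
instance (p : Int) (out : Int) : Decidable (Spec_optimal_duo_arrangement_cost p out) := by unfold Spec_optimal_duo_arrangement_cost; infer_instance

-- ===== CLAIM (what is proved, stated in full; the proofs are below) =====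
def Claim_equal_optimal_duo_arrangement_cost : Prop := ∀ (p : Int), Dom_optimal_duo_arrangement_cost p → Spec_optimal_duo_arrangement_cost p (optimal_duo_arrangement_cost p)

-- ===== LEMMAS AND PROOFS =====

-- A's fold, started at a reduced accumulator, computes (acc · ∏ a(p-a)) % p.
theorem pvFoldA (p : Int) (l : List Int) (acc : Int) :
    l.foldl (fun acc a => (acc * ((a * (p - a)) % p)) % p) (acc % p)
      = (acc * (l.map (fun a => a * (p - a))).prod) % p := by
  induction l generalizing acc with
  | nil => simp
  | cons a t ih =>
      simp only [List.foldl_cons]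
      have h1 : (acc % p * ((a * (p - a)) % p)) % p = (acc * (a * (p - a))) % p := by
        rw [← Int.mul_emod]
      rw [h1, ih (acc * (a * (p - a)))]
      simp [List.prod_cons, mul_assoc]

-- B's fold, started at a reduced accumulator, computes (acc · ∏ a) % p.
theorem pvFoldB (p : Int) (l : List Int) (acc : Int) :
    l.foldl (fun f a => (f * a) % p) (acc % p) = (acc * l.prod) % p := by
  induction l generalizing acc with
  | nil => simp
  | cons a t ih =>
      simp only [List.foldl_cons]
      have h1 : (acc % p * a) % p = (acc * a) % p := by
        rw [Int.mul_emod, Int.emod_emod_of_dvd _ dvd_rfl, ← Int.mul_emod]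
      rw [h1, ih (acc * a)]
      simp [List.prod_cons, mul_assoc]

-- ∏ a(p-a) ≡ (-1)^|l| · (∏ a)² (mod p)
theorem pvProdMod (p : Int) (l : List Int) :
    (l.map (fun a => a * (p - a))).prod ≡ (-1) ^ l.length * (l.prod * l.prod) [ZMOD p] := by
  induction l with
  | nil => simp
  | cons a t ih =>
      have ha : a * (p - a) ≡ -(a * a) [ZMOD p] := Int.modEq_iff_dvd.mpr ⟨-a, by ring⟩
      calc ((a :: t).map (fun a => a * (p - a))).prod
          = a * (p - a) * (t.map (fun a => a * (p - a))).prod := by simp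
        _ ≡ -(a * a) * ((-1) ^ t.length * (t.prod * t.prod)) [ZMOD p] := ha.mul ih
        _ = (-1) ^ (a :: t).length * ((a :: t).prod * (a :: t).prod) := by
              simp [pow_succ]; ring

-- ===== VERDICT (by name: the statement is the Claim_ definition above) =====
theorem optimal_duo_arrangement_cost_spec : Claim_equal_optimal_duo_arrangement_cost := by
  intro p _
  unfold Spec_optimal_duo_arrangement_cost optimal_duo_arrangement_cost optimal_duo_arrangement_cost_alt
  set q : Int := PySem.Int.floordiv (p + 1) 2 with hq
  by_cases hm : q - 1 ≤ 0
  · -- empty range on both sides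
    simp only [hm, if_pos]
    rw [PySem.List.pyRange_one_eq_nil (by omega)]
    simp
  · -- q ≥ 2, hence p ≥ 3 > 0
    have hq2 : 2 ≤ q := by omega
    have hp3 : 3 ≤ p := by
      have := (PySem.Int.le_floordiv_iff_mul_le (a := p + 1) (b := 2) (q := 2) (by omega)).mp (hq ▸ hq2)
      omega
    have hppos : (0:Int) < p := by omega
    simp only [hm, if_neg, not_false_iff]
    have hrange : q - 1 + 1 = q := by omega
    rw [hrange]
    set l : List Int := PySem.List.pyRange 1 q 1 with hl
    have hmod : ∀ a : Int, PySem.Int.mod a p = a % p := fun a =>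
      PySem.Int.mod_eq_emod_of_pos hppos
    simp only [hmod, List.foldl_map]
    have hone : (1 : Int) % p = 1 := Int.emod_eq_of_lt (by omega) (by omega)
    have hA : l.foldl (fun acc a => (acc * ((a * (p - a)) % p)) % p) 1
        = (l.map (fun a => a * (p - a))).prod % p := by
      have h := pvFoldA p l 1
      rwa [hone, one_mul] at h
    have hBf : l.foldl (fun f a => (f * a) % p) 1 = l.prod % p := by
      have h := pvFoldB p l 1
      rwa [hone, one_mul] at h
    rw [hA, hBf]
    have hlen : l.length = (q - 1).toNat := by
      rw [hl, PySem.List.length_pyRange_one]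
    have hP : l.prod % p ≡ l.prod [ZMOD p] := Int.emod_emod_of_dvd _ dvd_rfl
    have h2 : (-1 : Int) ^ (q - 1).toNat * (l.prod % p) * (l.prod % p)
        ≡ (-1) ^ l.length * (l.prod * l.prod) [ZMOD p] := by
      have h := ((Int.ModEq.refl ((-1 : Int) ^ (q - 1).toNat)).mul hP).mul hP
      simpa [hlen, mul_assoc] using h
    exact (pvProdMod p l).trans h2.symm
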